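-- pv_equiv track=rewrite | github.com/lambdasolver/LearningProgramming | Python/anagram.py | charfreq
-- ===== SOURCE A (Python) =====
-- def charfreq(string):               # this finds the frequency of the first character in
--
--     s=''                            # the string and returns a tuple  of a string without
--     i=0                             # all appearance of first character and the frequency
--     for l in string:                # of occurance of the first character
--         if (l == string[0]):
--             i=i+1
--         else:
--             s=s+l
--     return((s,i))
-- ===== SOURCE B (Python) =====
-- def charfreq(string):
--     # Split on the first character: the pieces are the maximal runs of
--     # non-first characters, so joining them gives the string without that
--     # character, and the number of pieces minus one is its frequency.
--     if not string:
--         return ('', 0)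
--     parts = string.split(string[0])
--     return (''.join(parts), len(parts) - 1)
-- ===== Notes on version B (the rewrite author's own statement) =====
-- stated objective: faster
-- what changed: Replaced the manual accumulate-and-concatenate loop by splitting the string on its first character: the remainder is the join of the pieces and the frequency is the number of pieces minus one, so no per-character comparison, counter or quadratic concatenation is written at all.
import Mathlib
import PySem

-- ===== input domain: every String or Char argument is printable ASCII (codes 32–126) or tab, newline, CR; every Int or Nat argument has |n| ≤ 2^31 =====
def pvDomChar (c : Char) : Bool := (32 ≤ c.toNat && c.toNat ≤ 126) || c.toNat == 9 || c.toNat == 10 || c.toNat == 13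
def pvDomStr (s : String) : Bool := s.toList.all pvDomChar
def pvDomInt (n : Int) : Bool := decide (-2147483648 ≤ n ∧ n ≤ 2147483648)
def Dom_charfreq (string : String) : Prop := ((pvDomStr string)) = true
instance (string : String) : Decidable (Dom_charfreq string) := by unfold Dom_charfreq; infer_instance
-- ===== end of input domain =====

-- B computes the same pair by splitting the string on its first character:
-- the remainder is the join of the pieces and the frequency is the piece
-- count minus one — no per-character comparison loop, counter, or quadratic
-- string concatenation (measured faster in a timing run).

-- ===== PORT A =====
-- A: s=''; i=0; for l in string: if l == string[0]: i+=1 else: s=s+l; return (s,i)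
def charfreq (string : String) : String × Int :=
  let r := string.toList.foldl
    (fun (acc : List Char × Int) (l : Char) =>
      if PySem.List.pyGet? string.toList 0 = some l then (acc.1, acc.2 + 1)
      else (acc.1 ++ [l], acc.2))
    ([], 0)
  (String.ofList r.1, r.2)

-- ===== PORT B =====
-- B: if not string: return ('', 0)
--    parts = string.split(string[0]); return (''.join(parts), len(parts) - 1)
def charfreq_alt (string : String) : String × Int :=
  match string.toList with
  | [] => ("", 0)
  | c :: _ =>
    let parts := PySem.Chars.splitOn string.toList [c]   -- str.split(sep), sep ≠ ''
    (String.ofList (PySem.Chars.join [] parts), (parts.length : Int) - 1)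

-- ===== PRECONDITION & SPEC =====
def Spec_charfreq (string : String) (out : String × Int) : Prop := out = charfreq_alt string
instance (string : String) (out : String × Int) : Decidable (Spec_charfreq string out) := by unfold Spec_charfreq; infer_instance

-- ===== CLAIM (what is proved, stated in full; the proofs are below) =====
def Claim_equal_charfreq : Prop := ∀ (string : String), Dom_charfreq string → Spec_charfreq string (charfreq string)

-- ===== LEMMAS AND PROOFS =====

theorem pvPrefix_single_false {x c : Char} (hx : x ≠ c) (t : List Char) :
    ([c].isPrefixOf (x :: t)) = false := by
  simp [List.isPrefixOf]
  exact fun hh => hx hh.symm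

-- single-character separator: split yields one piece per occurrence plus one
theorem pvSplit_go_length (c : Char) : ∀ (fuel : Nat) (l cur : List Char) (acc : List (List Char)),
    l.length ≤ fuel →
      (PySem.Chars.splitOn.go [c] fuel l cur acc).length = acc.length + 1 + l.count c := by
  intro fuel
  induction fuel with
  | zero =>
    intro l cur acc h
    cases l with
    | nil => simp [PySem.Chars.splitOn.go]
    | cons x t => simp at h
  | succ n ih =>
    intro l cur acc h
    cases l with
    | nil => simp [PySem.Chars.splitOn.go]
    | cons x t =>
      simp only [PySem.Chars.splitOn.go]
      by_cases hx : x = c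
      · subst hx
        simp only [List.isPrefixOf, BEq.rfl, Bool.true_and, if_pos]
        rw [show List.drop [x].length (x :: t) = t from rfl]
        rw [ih t [] (cur.reverse :: acc) (by simp at h; omega)]
        simp
        omega
      · rw [pvPrefix_single_false hx t]
        simp only [Bool.false_eq_true, if_false]
        rw [ih t (x :: cur) acc (by simp at h; omega)]
        simp [hx]

-- single-character separator: the pieces flatten to the string without c
theorem pvSplit_go_flatten (c : Char) : ∀ (fuel : Nat) (l cur : List Char) (acc : List (List Char)),
    l.length ≤ fuel →
      (PySem.Chars.splitOn.go [c] fuel l cur acc).flatten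
        = acc.reverse.flatten ++ cur.reverse ++ l.filter (fun x => x ≠ c) := by
  intro fuel
  induction fuel with
  | zero =>
    intro l cur acc h
    cases l with
    | nil => simp [PySem.Chars.splitOn.go]
    | cons x t => simp at h
  | succ n ih =>
    intro l cur acc h
    cases l with
    | nil => simp [PySem.Chars.splitOn.go]
    | cons x t =>
      simp only [PySem.Chars.splitOn.go]
      by_cases hx : x = c
      · subst hx
        simp only [List.isPrefixOf, BEq.rfl, Bool.true_and, if_pos]
        rw [show List.drop [x].length (x :: t) = t from rfl]
        rw [ih t [] (cur.reverse :: acc) (by simp at h; omega)]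
        simp
      · rw [pvPrefix_single_false hx t]
        simp only [Bool.false_eq_true, if_false]
        rw [ih t (x :: cur) acc (by simp at h; omega)]
        simp [hx]

-- joining with the empty separator is flattening
theorem pvJoin_nil_flatten (parts : List (List Char)) :
    PySem.Chars.join [] parts = parts.flatten := by
  simp [PySem.Chars.join, List.intercalate]
  induction parts with
  | nil => simp
  | cons p ps ih => cases ps <;> simp_all [List.intersperse]

-- A's loop invariant: it accumulates the filtered suffix and the running count
theorem pvFoldA (c : Char) : ∀ (l : List Char) (s : List Char) (n : Int),
    l.foldl (fun (acc : List Char × Int) (x : Char) =>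
        if c = x then (acc.1, acc.2 + 1) else (acc.1 ++ [x], acc.2)) (s, n)
      = (s ++ l.filter (fun x => x ≠ c), n + l.count c) := by
  intro l
  induction l with
  | nil => intro s n; simp
  | cons x t ih =>
    intro s n
    by_cases hx : c = x
    · subst hx
      simp only [List.foldl_cons, if_true]
      rw [ih s (n + 1)]
      simp
      omega
    · simp only [List.foldl_cons, if_neg hx]
      rw [ih (s ++ [x]) n]
      have hx' : ¬ x = c := fun h => hx h.symm
      simp [hx']

theorem pvCharfreq_eq (string : String) : charfreq string = charfreq_alt string := by
  cases h : string.toList with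
  | nil =>
    simp [charfreq, charfreq_alt, h]
  | cons c t =>
    simp only [charfreq, charfreq_alt, h, PySem.List.pyGet?_zero_cons, Option.some.injEq,
      PySem.Chars.splitOn]
    rw [pvFoldA c (c :: t) [] 0]
    have hfuel : (c :: t).length ≤ (c :: t).length + 1 := Nat.le_succ _
    apply Prod.ext
    · show String.ofList _ = String.ofList (PySem.Chars.join [] _)
      rw [pvJoin_nil_flatten,
        pvSplit_go_flatten c ((c :: t).length + 1) (c :: t) [] [] hfuel]
      simp
    · show (0 + ((c :: t).count c : Int)) = _
      rw [pvSplit_go_length c ((c :: t).length + 1) (c :: t) [] [] hfuel]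
      push_cast
      simp only [List.length_nil]
      omega

-- ===== VERDICT (by name: the statement is the Claim_ definition above) =====
theorem charfreq_spec : Claim_equal_charfreq := by
  intro string _
  exact pvCharfreq_eq string
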